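-- pv_equiv track=rewrite | github.com/Arraymanios/mooc-programming-23 | part04-35_no_vowels_allowed/src/no_vowels_allowed.py | no_vowels
-- ===== SOURCE A (Python) =====
-- def no_vowels(string):
--   vowels = ['a','e','i','o','u']
--   new_string = ""
--   i = 0
--
--   while i < len(string):
--     if string[i] not in vowels:
--       new_string += string[i]
--     else:
--       new_string += ""
--     i += 1
--   return new_string
-- ===== SOURCE B (Python) =====
-- def no_vowels(string):
--     table = {ord(c): None for c in "aeiou"}
--     return string.translate(table)
-- ===== Notes on version B (the rewrite author's own statement) =====
-- stated objective: faster
-- what changed: Replaces the explicit index loop with repeated string concatenation and a list-membership test by building an ord->None deletion table once and doing a single str.translate pass.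
import Mathlib
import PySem

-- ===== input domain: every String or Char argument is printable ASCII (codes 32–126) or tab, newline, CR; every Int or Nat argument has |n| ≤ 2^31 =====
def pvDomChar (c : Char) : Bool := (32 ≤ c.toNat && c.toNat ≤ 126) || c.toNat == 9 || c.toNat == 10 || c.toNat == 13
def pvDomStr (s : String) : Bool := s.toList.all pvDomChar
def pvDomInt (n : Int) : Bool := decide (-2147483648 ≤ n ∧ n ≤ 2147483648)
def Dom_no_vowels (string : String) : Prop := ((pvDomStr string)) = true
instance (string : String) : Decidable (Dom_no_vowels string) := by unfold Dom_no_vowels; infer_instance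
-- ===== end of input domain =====

-- B builds an ord->None deletion table once and removes the mapped characters in one translate pass,
-- instead of A's index loop with repeated string concatenation and a list-membership test.


-- ===== PORT A =====
-- while i < len(string): if string[i] not in vowels: new_string += string[i] else: new_string += ""
def no_vowels (string : String) : String :=
  let vowels : List Char := ['a','e','i','o','u']
  let cs := string.toList
  String.ofList
    ((PySem.List.pyRange 0 (PySem.Str.len string) 1).foldl
      (fun acc i =>
        if PySem.List.pyGetD cs i ' ' ∉ vowels then acc ++ [PySem.List.pyGetD cs i ' ']
        else acc ++ [])
      [])

-- ===== PORT B =====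
-- table = {ord(c): None for c in "aeiou"}; return string.translate(table)
-- str.translate ported by hand: with an all-None mapping it deletes exactly the chars whose code
-- is a key of the table and keeps every other char (exact for this table).
def no_vowels_alt (string : String) : String :=
  let table : List (Int × Option Unit) := "aeiou".toList.map (fun c => ((c.toNat : Int), none))
  String.ofList (string.toList.filter (fun c => !(table.any (fun kv => kv.1 == (c.toNat : Int)))))

-- ===== PRECONDITION & SPEC =====
def Spec_no_vowels (string : String) (out : String) : Prop := out = no_vowels_alt string
instance (string : String) (out : String) : Decidable (Spec_no_vowels string out) := by unfold Spec_no_vowels; infer_instance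

-- ===== CLAIM (what is proved, stated in full; the proofs are below) =====
def Claim_equal_no_vowels : Prop := ∀ (string : String), Dom_no_vowels string → Spec_no_vowels string (no_vowels string)

-- ===== LEMMAS AND PROOFS =====
-- comparing a char's code (as Int) with a literal char's code is comparing the chars
theorem vowel_code (c a : Char) : (((a.toNat : Int)) == ((c.toNat : Int))) = decide (c = a) := by
  have h1 : (((a.toNat : Int)) == ((c.toNat : Int))) = decide ((a.toNat : Int) = (c.toNat : Int)) := by
    cases h : decide ((a.toNat : Int) = (c.toNat : Int)) <;> simp_all
  rw [h1, decide_eq_decide]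
  have h2 : c.toNat = c.val.toNat := rfl
  have h3 : a.toNat = a.val.toNat := rfl
  rw [h2, h3, Char.ext_iff, ← UInt32.toNat_inj]
  omega

-- A's "not in vowels" test coincides with B's "code not a key of the table" test
theorem no_vowels_pred_eq (c : Char) :
    (decide (c ∉ (['a','e','i','o','u'] : List Char))) =
      !(("aeiou".toList.map (fun c => ((c.toNat : Int), (none : Option Unit)))).any
          (fun kv => kv.1 == (c.toNat : Int))) := by
  simp only [show "aeiou".toList = ['a','e','i','o','u'] from rfl, List.map, List.any_cons,
    List.any_nil, vowel_code]
  simp [List.mem_cons, decide_not]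

-- ===== VERDICT (by name: the statement is the Claim_ definition above) =====
theorem no_vowels_spec : Claim_equal_no_vowels := by
  intro s _
  unfold Spec_no_vowels no_vowels no_vowels_alt
  show String.ofList
      ((PySem.List.pyRange 0 (PySem.Str.len s) 1).foldl
        (fun acc i =>
          if PySem.List.pyGetD s.toList i ' ' ∉ (['a','e','i','o','u'] : List Char) then
            acc ++ [PySem.List.pyGetD s.toList i ' ']
          else acc ++ []) []) = _
  rw [PySem.Str.len_eq, PySem.List.foldl_pyRange_zero_pyGetD' s.toList ' '
        (fun acc c => if c ∉ (['a','e','i','o','u'] : List Char) then acc ++ [c] else acc ++ []) []]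
  simp only [List.append_nil]
  rw [PySem.List.foldl_append_ite_eq_filter]
  simp only [List.nil_append]
  congr 1
  apply List.filter_congr
  intro c _
  exact no_vowels_pred_eq c
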